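-- pv_equiv track=rewrite | github.com/KingWitherBrine/py | other/python/cow_gate_me_write.py | solve
-- ===== SOURCE A (Python) =====
-- def solve(cows):
--   logs = [None] * (len(cows) + 1)
--   count = 0
--   for cow_id, side in cows:
--     if logs[cow_id] != None and logs[cow_id] != side:
--       count += 1
--     logs[cow_id] = side
--   return count
-- ===== SOURCE B (Python) =====
-- def solve(cows):
--     # Group-by-cow: collect each slot's sequence of sides, then count adjacent changes.
--     seqs = [[] for _ in range(len(cows) + 1)]
--     for cow_id, side in cows:
--         seqs[cow_id].append(side)
--     total = 0
--     for seq in seqs: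
--         for prev, cur in zip(seq, seq[1:]):
--             if prev != cur:
--                 total += 1
--     return total
-- ===== Notes on version B (the rewrite author's own statement) =====
-- stated objective: alternative
-- what changed: Replaces A's interleaved last-seen array with running counter by a two-phase group-by: first build per-slot side sequences, then sum adjacent-differ pairs per sequence.
import Mathlib
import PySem

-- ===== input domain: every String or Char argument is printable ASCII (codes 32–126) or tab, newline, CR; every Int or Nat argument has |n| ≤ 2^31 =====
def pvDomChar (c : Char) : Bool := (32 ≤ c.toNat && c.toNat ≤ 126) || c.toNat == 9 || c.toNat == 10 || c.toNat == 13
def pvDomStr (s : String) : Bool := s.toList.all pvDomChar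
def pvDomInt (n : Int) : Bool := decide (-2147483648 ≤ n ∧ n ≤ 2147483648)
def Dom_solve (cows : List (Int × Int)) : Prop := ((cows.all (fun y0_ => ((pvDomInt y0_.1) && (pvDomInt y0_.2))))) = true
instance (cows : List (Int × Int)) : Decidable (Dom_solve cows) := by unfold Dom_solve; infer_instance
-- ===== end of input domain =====

-- B replaces A's interleaved last-seen array + running counter by a two-phase group-by
-- (build per-slot side sequences, then count adjacent changes per sequence); alternative, same cost.

-- ===== PORT A =====
-- state: (logs, count); logs[cow_id] read/write via pyGet?/pySetD (negative indices wrap as in Python;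
-- out-of-range = IndexError, excluded by Pre_solve; the port leaves state unchanged there).
def solve (cows : List (Int × Int)) : Int :=
  (cows.foldl (fun (st : List (Option Int) × Int) p =>
      match PySem.List.pyGet? st.1 p.1 with
      | some v =>
          (PySem.List.pySetD st.1 p.1 (some p.2),
           if v ≠ none ∧ v ≠ some p.2 then st.2 + 1 else st.2)
      | none => st)
    (List.replicate (cows.length + 1) none, 0)).2

-- ===== PORT B =====
-- first pass: seqs[cow_id].append(side); second pass: for each seq, count adjacent differing pairs.
def solve_alt (cows : List (Int × Int)) : Int :=
  let seqs := cows.foldl (fun (s : List (List Int)) p =>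
      match PySem.List.pyGet? s p.1 with
      | some l => PySem.List.pySetD s p.1 (l ++ [p.2])
      | none => s)
    (List.replicate (cows.length + 1) ([] : List Int))
  seqs.foldl (fun total seq =>
      (seq.zip (seq.drop 1)).foldl
        (fun t q => if q.1 ≠ q.2 then t + 1 else t) total) 0

-- ===== PRECONDITION & SPEC =====
-- Pre_ excludes exactly the inputs where Python A raises IndexError (a cow_id outside [-(len+1), len]).
def Pre_solve (cows : List (Int × Int)) : Prop :=
  ∀ p ∈ cows, PySem.Raise.InRange (cows.length + 1) p.1
instance (cows : List (Int × Int)) : Decidable (Pre_solve cows) := by unfold Pre_solve; infer_instance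
def pvWitness_solve : (List (Int × Int)) := [(0, 1), (1, 0), (0, 0), (0, 1)]
def Spec_solve (cows : List (Int × Int)) (out : Int) : Prop := out = solve_alt cows
instance (cows : List (Int × Int)) (out : Int) : Decidable (Spec_solve cows out) := by unfold Spec_solve; infer_instance

-- ===== CLAIM (what is proved, stated in full; the proofs are below) =====
def Claim_equal_solve : Prop := ∀ (cows : List (Int × Int)), Dom_solve cows → Pre_solve cows → Spec_solve cows (solve cows)

-- ===== LEMMAS AND PROOFS =====

-- recursive characterisation of the adjacent-differ count
def pvAdj : List Int → Int
  | a :: b :: t => (if a ≠ b then 1 else 0) + pvAdj (b :: t)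
  | _ => 0

theorem zipfold_eq_pvAdj : ∀ (l : List Int) (t : Int),
    (l.zip (l.drop 1)).foldl (fun t q => if q.1 ≠ q.2 then t + 1 else t) t = t + pvAdj l := by
  intro l
  match l with
  | [] => intro t; simp [pvAdj]
  | [a] => intro t; simp [pvAdj]
  | a :: b :: tl =>
      intro t
      have ih := zipfold_eq_pvAdj (b :: tl)
      simp only [List.drop_succ_cons, List.drop_zero, List.zip_cons_cons, List.foldl_cons] at *
      rw [ih]
      simp only [pvAdj]
      split <;> omega

theorem pvAdj_append_singleton : ∀ (l : List Int) (x : Int),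
    pvAdj (l ++ [x]) = pvAdj l + (match l.getLast? with
      | none => 0
      | some y => if y ≠ x then 1 else 0) := by
  intro l
  match l with
  | [] => intro x; simp [pvAdj]
  | [a] => intro x; simp only [List.cons_append, List.nil_append, pvAdj, List.getLast?_singleton]; omega
  | a :: b :: tl =>
      intro x
      have ih := pvAdj_append_singleton (b :: tl) x
      simp only [List.cons_append] at *
      simp only [pvAdj] at *
      rw [ih]
      simp only [List.getLast?_cons_cons]
      omega

-- sum of pvAdj over the table
def pvSum (seqs : List (List Int)) : Int := (seqs.map pvAdj).sum

theorem pvSum_set (seqs : List (List Int)) (j : Nat) (hj : j < seqs.length) (m : List Int) :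
    pvSum (seqs.set j m) = pvSum seqs + pvAdj m - pvAdj seqs[j] := by
  unfold pvSum
  induction seqs generalizing j with
  | nil => simp at hj
  | cons a t ih =>
      cases j with
      | zero => simp; ring
      | succ j' =>
          simp only [List.set_cons_succ, List.map_cons, List.sum_cons]
          rw [ih j' (by simpa using hj)]
          simp only [List.getElem_cons_succ]
          ring

-- the Python index actually used by logs[i] / seqs[i] when i is in range
def pvIdx (n : Nat) (i : Int) : Nat := if 0 ≤ i then i.toNat else n - (-i).toNat

theorem pvIdx_lt (n : Nat) (i : Int) (h : PySem.Raise.InRange n i) : pvIdx n i < n := by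
  simp [PySem.Raise.InRange] at h
  unfold pvIdx; split <;> omega

theorem pvGet_eq_idx {α : Type} (xs : List α) (i : Int) (h : PySem.Raise.InRange xs.length i) :
    PySem.List.pyGet? xs i = some (xs[pvIdx xs.length i]'(pvIdx_lt _ _ h)) := by
  have h' := h
  simp [PySem.Raise.InRange] at h'
  have hlt := pvIdx_lt xs.length i h
  simp only [PySem.List.pyGet?, PySem.List.pyIdx?, pvIdx] at *
  split
  · rw [if_pos (by omega), Option.bind_some]; exact List.getElem?_eq_getElem (by omega)
  · rw [if_pos (by omega), Option.bind_some]; exact List.getElem?_eq_getElem (by omega)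

theorem pvSet_eq_idx {α : Type} (xs : List α) (i : Int) (v : α)
    (h : PySem.Raise.InRange xs.length i) :
    PySem.List.pySetD xs i v = xs.set (pvIdx xs.length i) v := by
  simp [PySem.Raise.InRange] at h
  simp only [PySem.List.pySetD, PySem.List.pySet?, PySem.List.pyIdx?, pvIdx]
  split
  · rw [if_pos (by omega)]; rfl
  · rw [if_pos (by omega)]; rfl

-- the main loop invariant: running A's loop and B's build over the same suffix,
-- from consistent states, produces counts that differ by the adjacency sums.
theorem pvLoop (rest : List (Int × Int)) :
    ∀ (logs : List (Option Int)) (seqs : List (List Int)) (count : Int),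
    logs.length = seqs.length →
    (∀ j : Nat, logs.getD j none = (seqs.getD j []).getLast?) →
    (∀ p ∈ rest, PySem.Raise.InRange seqs.length p.1) →
    (rest.foldl (fun (st : List (Option Int) × Int) p =>
        match PySem.List.pyGet? st.1 p.1 with
        | some v =>
            (PySem.List.pySetD st.1 p.1 (some p.2),
             if v ≠ none ∧ v ≠ some p.2 then st.2 + 1 else st.2)
        | none => st) (logs, count)).2
    = count + pvSum (rest.foldl (fun (s : List (List Int)) p =>
        match PySem.List.pyGet? s p.1 with
        | some l => PySem.List.pySetD s p.1 (l ++ [p.2])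
        | none => s) seqs) - pvSum seqs := by
  induction rest with
  | nil => intro logs seqs count _ _ _; simp
  | cons p rest ih =>
      intro logs seqs count hlen hinv hpre
      have hr : PySem.Raise.InRange seqs.length p.1 := hpre p (by simp)
      have hrl : PySem.Raise.InRange logs.length p.1 := by rwa [hlen]
      have hidx : pvIdx logs.length p.1 = pvIdx seqs.length p.1 := by rw [hlen]
      have hj : pvIdx seqs.length p.1 < seqs.length := pvIdx_lt _ _ hr
      have hjl : pvIdx seqs.length p.1 < logs.length := by omega
      simp only [List.foldl_cons]
      rw [pvGet_eq_idx logs p.1 hrl, pvGet_eq_idx seqs p.1 hr]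
      dsimp only
      rw [pvSet_eq_idx logs p.1 _ hrl, pvSet_eq_idx seqs p.1 _ hr]
      simp only [hidx]
      have hvinv : (logs[pvIdx seqs.length p.1]'hjl : Option Int)
          = (seqs[pvIdx seqs.length p.1]'hj).getLast? := by
        have h2 := hinv (pvIdx seqs.length p.1)
        rw [List.getD_eq_getElem _ _ hjl, List.getD_eq_getElem _ _ hj] at h2
        exact h2
      rw [ih (logs.set (pvIdx seqs.length p.1) (some p.2))
             (seqs.set (pvIdx seqs.length p.1) ((seqs[pvIdx seqs.length p.1]'hj) ++ [p.2]))
             _ (by simp [hlen])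
             ?_ (by intro q hq; simpa using hpre q (by simp [hq]))]
      · rw [pvSum_set seqs _ hj, pvAdj_append_singleton, hvinv]
        cases hgl : (seqs[pvIdx seqs.length p.1]'hj).getLast? with
        | none => simp; try ring
        | some y => by_cases hy : y = p.2 <;> · simp [hy]; try ring
      · intro j
        by_cases hjj : j = pvIdx seqs.length p.1
        · subst hjj
          rw [List.getD_eq_getElem _ _ (by simpa using hjl),
              List.getD_eq_getElem _ _ (by simpa using hj)]
          rw [List.getElem_set_self, List.getElem_set_self]
          simp
        · by_cases hjb : j < seqs.length
          · rw [List.getD_eq_getElem _ _ (by simp; omega),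
                List.getD_eq_getElem _ _ (by simpa using hjb)]
            rw [List.getElem_set_ne (by omega), List.getElem_set_ne (by omega)]
            have h2 := hinv j
            rw [List.getD_eq_getElem _ _ (by omega), List.getD_eq_getElem _ _ hjb] at h2
            exact h2
          · rw [List.getD_eq_default _ _ (by simp; omega),
                List.getD_eq_default _ _ (by simp; omega)]
            simp

-- second phase of B equals pvSum
theorem pvPhase2 (seqs : List (List Int)) (t : Int) :
    seqs.foldl (fun total seq =>
      (seq.zip (seq.drop 1)).foldl
        (fun t q => if q.1 ≠ q.2 then t + 1 else t) total) t = t + pvSum seqs := by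
  induction seqs generalizing t with
  | nil => simp [pvSum]
  | cons a tl ih =>
      simp only [List.foldl_cons]
      rw [zipfold_eq_pvAdj, ih]
      simp [pvSum]; ring

-- ===== VERDICT (by name: the statement is the Claim_ definition above) =====
theorem solve_spec : Claim_equal_solve := by
  intro cows _ hpre
  unfold Spec_solve solve solve_alt
  simp only []
  rw [pvPhase2]
  rw [pvLoop cows (List.replicate (cows.length + 1) none)
        (List.replicate (cows.length + 1) ([] : List Int)) 0 (by simp)
        (by intro j; simp [List.getD])
        (by intro q hq; simpa using hpre q hq)]
  simp [pvSum, pvAdj]
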